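-- pv_equiv track=rewrite | github.com/mpajunen/advent-of-code | 2017/src/day23.py | get_inner_f_loop
-- ===== SOURCE A (Python) =====
-- def get_inner_f_loop(b, d, f):
--     e = 2  # Outside the actual loop
--     g = -1
--
--     while g != 0:
--         g = d * e - b
--         if g == 0:
--             return 0
--
--         e += 1
--         g = e - b
--
--     return f
-- ===== SOURCE B (Python) =====
-- def get_inner_f_loop(b, d, f):
--     # O(1): a divisor e in [2, b-1] with d*e == b exists iff d divides b
--     # and the quotient b // d lies in that range.
--     return 0 if d != 0 and b % d == 0 and 2 <= b // d <= b - 1 else f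
-- ===== Notes on version B (the rewrite author's own statement) =====
-- stated objective: faster
-- what changed: Replaces the linear scan of e = 2..b-1 testing d*e == b by a constant-time divisibility check (d divides b and 2 <= b//d <= b-1).
-- outside the precondition, e.g. on get_inner_f_loop(2, 1, 5): A returns 0, B returns 5; on get_inner_f_loop(0, 0, 7): A returns 0, B returns 7
import Mathlib
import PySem

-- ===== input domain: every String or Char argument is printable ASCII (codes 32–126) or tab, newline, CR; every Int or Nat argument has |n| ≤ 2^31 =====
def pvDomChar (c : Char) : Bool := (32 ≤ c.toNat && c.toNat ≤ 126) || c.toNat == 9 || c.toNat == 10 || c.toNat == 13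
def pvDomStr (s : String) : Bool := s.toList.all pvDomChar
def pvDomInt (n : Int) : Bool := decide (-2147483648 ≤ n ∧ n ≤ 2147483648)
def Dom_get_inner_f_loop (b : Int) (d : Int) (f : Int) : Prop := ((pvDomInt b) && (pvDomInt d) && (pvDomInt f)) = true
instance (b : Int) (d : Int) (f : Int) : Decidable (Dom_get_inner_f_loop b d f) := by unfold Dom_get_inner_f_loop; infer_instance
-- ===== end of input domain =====

-- B replaces A's linear scan for a divisor e in [2, b-1] with d*e == b by a
-- constant-time divisibility check; measurably faster (O(1) vs O(b)).


-- ===== PORT A =====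
-- while-loop with state e: test d*e == b (return 0), then e += 1 and exit with f when e == b.
-- The '≤' in the exit test only makes the recursion total: Python reaches e+1 > b
-- (and diverges) only when b < 3, which is outside Pre_.
def loopA (b d f e : Int) : Int :=
  if d * e - b = 0 then 0
  else if b ≤ e + 1 then f
  else loopA b d f (e + 1)
termination_by (b - e).toNat
decreasing_by omega

def get_inner_f_loop (b : Int) (d : Int) (f : Int) : Int := loopA b d f 2

-- ===== PORT B =====
def get_inner_f_loop_alt (b : Int) (d : Int) (f : Int) : Int :=
  if d ≠ 0 ∧ PySem.Int.mod b d = 0 ∧ 2 ≤ PySem.Int.floordiv b d ∧ PySem.Int.floordiv b d ≤ b - 1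
  then 0 else f

-- ===== PRECONDITION & SPEC =====
-- Pre_ excludes b < 3: there A's while-loop diverges for almost every d (the exit test
-- e - b == 0 is never reached), and the few returns it does make (a 0 when the scan,
-- already past b, happens to hit d*e == b) are artefacts of the unbounded scan.
def Pre_get_inner_f_loop (b : Int) (d : Int) (f : Int) : Prop := 3 ≤ b
instance (b : Int) (d : Int) (f : Int) : Decidable (Pre_get_inner_f_loop b d f) := by unfold Pre_get_inner_f_loop; infer_instance
def pvWitness_get_inner_f_loop : Int × Int × Int := (12, 4, 7)

def Spec_get_inner_f_loop (b : Int) (d : Int) (f : Int) (out : Int) : Prop := out = get_inner_f_loop_alt b d f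
instance (b : Int) (d : Int) (f : Int) (out : Int) : Decidable (Spec_get_inner_f_loop b d f out) := by unfold Spec_get_inner_f_loop; infer_instance

-- ===== CLAIM (what is proved, stated in full; the proofs are below) =====
def Claim_equal_get_inner_f_loop : Prop := ∀ (b : Int) (d : Int) (f : Int), Dom_get_inner_f_loop b d f → Pre_get_inner_f_loop b d f → Spec_get_inner_f_loop b d f (get_inner_f_loop b d f)

-- ===== LEMMAS AND PROOFS =====

-- From state e (e ≤ b - 1), the loop returns 0 when some k in [e, b-1] has d*k = b.
theorem loopA_zero (b d f e : Int) (he : e ≤ b - 1)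
    (h : ∃ k, e ≤ k ∧ k ≤ b - 1 ∧ d * k = b) : loopA b d f e = 0 := by
  obtain ⟨k, hk1, hk2, hdk⟩ := h
  rw [loopA]
  by_cases h0 : d * e - b = 0
  · rw [if_pos h0]
  · have hke : k ≠ e := by rintro rfl; omega
    rw [if_neg h0, if_neg (by omega : ¬ b ≤ e + 1)]
    exact loopA_zero b d f (e + 1) (by omega) ⟨k, by omega, hk2, hdk⟩
termination_by (b - e).toNat
decreasing_by omega

-- From state e (e ≤ b - 1), the loop returns f when no k in [e, b-1] has d*k = b.
theorem loopA_f (b d f e : Int) (he : e ≤ b - 1)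
    (h : ∀ k, e ≤ k → k ≤ b - 1 → d * k ≠ b) : loopA b d f e = f := by
  rw [loopA]
  rw [if_neg (by have := h e le_rfl he; omega : ¬ d * e - b = 0)]
  by_cases h1 : b ≤ e + 1
  · rw [if_pos h1]
  · rw [if_neg h1]
    exact loopA_f b d f (e + 1) (by omega) (fun k hk1 hk2 => h k (by omega) hk2)
termination_by (b - e).toNat
decreasing_by omega

-- The scan condition equals B's divisibility condition.
theorem scan_iff (b d : Int) :
    (∃ k, 2 ≤ k ∧ k ≤ b - 1 ∧ d * k = b) ↔
      (d ≠ 0 ∧ PySem.Int.mod b d = 0 ∧ 2 ≤ PySem.Int.floordiv b d ∧ PySem.Int.floordiv b d ≤ b - 1) := by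
  constructor
  · rintro ⟨k, hk1, hk2, hdk⟩
    have hd : d ≠ 0 := by rintro rfl; omega
    have hmod : PySem.Int.mod b d = 0 :=
      (PySem.Int.mod_eq_zero_iff_dvd b d).mpr ⟨k, hdk.symm⟩
    have hdm := PySem.Int.floordiv_mul_add_mod b d
    rw [hmod, add_zero] at hdm
    have hq : PySem.Int.floordiv b d = k :=
      mul_right_cancel₀ hd (by rw [hdm, mul_comm, hdk])
    exact ⟨hd, hmod, by omega, by omega⟩
  · rintro ⟨hd, hmod, h2, hb⟩
    have hdm := PySem.Int.floordiv_mul_add_mod b d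
    rw [hmod, add_zero] at hdm
    exact ⟨PySem.Int.floordiv b d, h2, hb, by rw [mul_comm]; exact hdm⟩

-- ===== VERDICT (by name: the statement is the Claim_ definition above) =====
theorem get_inner_f_loop_spec : Claim_equal_get_inner_f_loop := by
  intro b d f _ hpre
  have hb : (3 : Int) ≤ b := hpre
  unfold Spec_get_inner_f_loop get_inner_f_loop get_inner_f_loop_alt
  by_cases hc : d ≠ 0 ∧ PySem.Int.mod b d = 0 ∧ 2 ≤ PySem.Int.floordiv b d ∧ PySem.Int.floordiv b d ≤ b - 1
  · rw [if_pos hc]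
    exact loopA_zero b d f 2 (by omega) ((scan_iff b d).mpr hc)
  · rw [if_neg hc]
    exact loopA_f b d f 2 (by omega)
      (fun k hk1 hk2 hdk => hc ((scan_iff b d).mp ⟨k, hk1, hk2, hdk⟩))
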